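-- pv_equiv track=rewrite | github.com/randysalars/dreamweaving | agents/product_builder/pipeline/ai_detector.py | _check_heading_density
-- ===== SOURCE A (Python) =====
-- def _check_heading_density(content: str) -> int:
--     """Check for sections that are mostly headings with no bridging content."""
--     lines = content.split('\n')
--     heading_clusters = 0
--     consecutive_headings = 0
--
--     for line in lines:
--         if line.strip().startswith('#'):
--             consecutive_headings += 1
--             if consecutive_headings >= 3:
--                 heading_clusters += 1
--         else:
--             consecutive_headings = 0
--
--     return heading_clusters
-- ===== SOURCE B (Python) =====
-- def _check_heading_density(content: str) -> int:
--     """Check for sections that are mostly headings with no bridging content."""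
--     lines = content.split('\n')
--     total = 0
--     i = 0
--     n = len(lines)
--     while i < n:
--         if lines[i].strip().startswith('#'):
--             j = i
--             while j < n and lines[j].strip().startswith('#'):
--                 j += 1
--             total += max(j - i - 2, 0)
--             i = j
--         else:
--             i += 1
--     return total
-- ===== Notes on version B (the rewrite author's own statement) =====
-- stated objective: alternative
-- what changed: Replaces the per-line counter state machine (consecutive_headings/heading_clusters) by a run-based two-pointer scan that adds max(run_length - 2, 0) per maximal heading run.
import Mathlib
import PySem

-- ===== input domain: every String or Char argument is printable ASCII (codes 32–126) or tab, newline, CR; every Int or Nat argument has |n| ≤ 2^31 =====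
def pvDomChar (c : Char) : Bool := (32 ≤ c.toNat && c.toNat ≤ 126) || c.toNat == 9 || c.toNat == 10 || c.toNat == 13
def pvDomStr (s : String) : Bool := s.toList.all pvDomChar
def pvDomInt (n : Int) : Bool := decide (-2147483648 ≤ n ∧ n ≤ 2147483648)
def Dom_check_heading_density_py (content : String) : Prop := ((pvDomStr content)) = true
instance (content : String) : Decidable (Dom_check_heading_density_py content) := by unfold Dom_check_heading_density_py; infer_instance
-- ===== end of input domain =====

-- B replaces A's per-line counter state machine by a run-based two-pointer scan
-- (each maximal heading run contributes max(len-2, 0)); objective: alternative.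

-- line.strip().startswith('#') — the heading test both versions literally write
def pvIsHeading (line : String) : Bool :=
  PySem.Str.startswith (PySem.Str.strip line) "#"

-- ===== PORT A =====
def check_heading_density_py (content : String) : Int :=
  let lines := (PySem.Str.split? content "\n").getD []
  let st := lines.foldl (fun (st : Int × Int) line =>
    if pvIsHeading line then
      let c := st.2 + 1
      (if c ≥ 3 then st.1 + 1 else st.1, c)
    else (st.1, 0)) (0, 0)
  st.1

-- ===== PORT B =====
-- the outer while-loop of Source B: at a heading line, the inner while advances j past
-- the whole run (takeWhile/dropWhile), adds max(run_len - 2, 0), and resumes at j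
def pvAltGo (lines : List String) : Int :=
  match lines with
  | [] => 0
  | l :: ls =>
    if pvIsHeading l then
      max ((1 + (ls.takeWhile pvIsHeading).length : Int) - 2) 0
        + pvAltGo (ls.dropWhile pvIsHeading)
    else
      pvAltGo ls
termination_by lines.length
decreasing_by
  · exact Nat.lt_succ_of_le (List.length_dropWhile_le _ _)
  · simp

def check_heading_density_py_alt (content : String) : Int :=
  pvAltGo ((PySem.Str.split? content "\n").getD [])

-- ===== PRECONDITION & SPEC =====
def Spec_check_heading_density_py (content : String) (out : Int) : Prop := out = check_heading_density_py_alt content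
instance (content : String) (out : Int) : Decidable (Spec_check_heading_density_py content out) := by unfold Spec_check_heading_density_py; infer_instance

-- ===== CLAIM (what is proved, stated in full; the proofs are below) =====
def Claim_equal_check_heading_density_py : Prop := ∀ (content : String), Dom_check_heading_density_py content → Spec_check_heading_density_py content (check_heading_density_py content)

-- ===== LEMMAS AND PROOFS =====

-- A's loop step
def pvStep (st : Int × Int) (line : String) : Int × Int :=
  if pvIsHeading line then
    let c := st.2 + 1
    (if c ≥ 3 then st.1 + 1 else st.1, c)
  else (st.1, 0)

lemma pvStep_pos (h c : Int) (l : String) (hp : pvIsHeading l = true) :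
    pvStep (h, c) l = (if c + 1 ≥ 3 then h + 1 else h, c + 1) := by
  simp [pvStep, hp]

lemma pvStep_neg (h c : Int) (l : String) (hp : ¬ pvIsHeading l = true) :
    pvStep (h, c) l = (h, 0) := by
  simp [pvStep, hp]

lemma pvFold_fst (ls : List String) : ∀ (h c : Int),
    (ls.foldl pvStep (h, c)).1 = h + (ls.foldl pvStep (0, c)).1 := by
  induction ls with
  | nil => intro h c; simp
  | cons l ls ih =>
    intro h c
    simp only [List.foldl]
    by_cases hp : pvIsHeading l = true
    · rw [pvStep_pos h c l hp, pvStep_pos 0 c l hp]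
      by_cases hc : c + 1 ≥ 3
      · rw [if_pos hc, if_pos hc, ih (h + 1), ih (0 + 1)]; ring
      · rw [if_neg hc, if_neg hc]; exact ih h (c + 1)
    · rw [pvStep_neg h c l hp, pvStep_neg 0 c l hp]
      exact ih h 0

lemma pvAltGo_span (ls : List String) :
    pvAltGo ls = max (((ls.takeWhile pvIsHeading).length : Int) - 2) 0
        + pvAltGo (ls.dropWhile pvIsHeading) := by
  cases ls with
  | nil => simp [pvAltGo]
  | cons l ls =>
    by_cases hp : pvIsHeading l = true
    · conv_lhs => rw [pvAltGo]
      simp only [hp, if_true, List.takeWhile_cons, List.dropWhile_cons, List.length_cons]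
      push_cast
      ring_nf
    · simp only [List.takeWhile_cons, List.dropWhile_cons, hp, if_false,
        Bool.false_eq_true, List.length_nil]
      omega

lemma pvMain (ls : List String) : ∀ (c : Int), 0 ≤ c →
    (ls.foldl pvStep (0, c)).1
      = max ((c + (ls.takeWhile pvIsHeading).length : Int) - 2) 0 - max (c - 2) 0
        + pvAltGo (ls.dropWhile pvIsHeading) := by
  induction ls with
  | nil => intro c hc; simp [pvAltGo]
  | cons l ls ih =>
    intro c hc
    simp only [List.foldl]
    by_cases hp : pvIsHeading l = true
    · rw [pvStep_pos 0 c l hp, pvFold_fst, ih (c + 1) (by omega)]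
      simp only [List.takeWhile_cons, List.dropWhile_cons, hp, if_true, List.length_cons]
      by_cases hc3 : c + 1 ≥ 3 <;> [rw [if_pos hc3]; rw [if_neg hc3]] <;>
        push_cast <;> omega
    · rw [pvStep_neg 0 c l hp, ih 0 le_rfl]
      simp only [List.takeWhile_cons, List.dropWhile_cons, hp, if_false,
        Bool.false_eq_true, List.length_nil]
      have hstep : pvAltGo (l :: ls) = pvAltGo ls := by rw [pvAltGo]; simp [hp]
      rw [hstep, pvAltGo_span ls]
      omega

-- ===== VERDICT (by name: the statement is the Claim_ definition above) =====
theorem check_heading_density_py_spec : Claim_equal_check_heading_density_py := by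
  intro content _
  show _ = _
  unfold check_heading_density_py check_heading_density_py_alt
  rw [show (fun (st : Int × Int) line =>
    if pvIsHeading line then
      let c := st.2 + 1
      (if c ≥ 3 then st.1 + 1 else st.1, c)
    else (st.1, 0)) = pvStep from rfl]
  rw [pvMain _ 0 le_rfl]
  have := pvAltGo_span ((PySem.Str.split? content "\n").getD [])
  omega
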